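-- pv_equiv track=rewrite | github.com/nking/recommender_systems | src/test/python/movie_lens_tfx/WriteRetrievalInputTFRecords.py | merge_accumulators
-- ===== SOURCE A (Python) =====
-- def merge_accumulators(accumulators):
--   c1_sum, c2_sum, c3_sum, c4_sum, c5_sum = 0, 0, 0, 0, 0
--   for c1, c2, c3, c4, c5 in accumulators:
--     c1_sum += c1
--     c2_sum += c2
--     c3_sum += c3
--     c4_sum += c4
--     c5_sum += c5
--   return (c1_sum, c2_sum, c3_sum, c4_sum, c5_sum)
-- ===== SOURCE B (Python) =====
-- def merge_accumulators(accumulators):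
--   sums = [0, 0, 0, 0, 0]
--   for i, col in enumerate(zip(*accumulators)):
--     sums[i] = sum(col)
--   return tuple(sums)
-- ===== Notes on version B (the rewrite author's own statement) =====
-- stated objective: alternative
-- what changed: B transposes the list with zip(*accumulators) and sums each of the five columns instead of maintaining five running scalars while iterating over the rows.
import Mathlib
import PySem

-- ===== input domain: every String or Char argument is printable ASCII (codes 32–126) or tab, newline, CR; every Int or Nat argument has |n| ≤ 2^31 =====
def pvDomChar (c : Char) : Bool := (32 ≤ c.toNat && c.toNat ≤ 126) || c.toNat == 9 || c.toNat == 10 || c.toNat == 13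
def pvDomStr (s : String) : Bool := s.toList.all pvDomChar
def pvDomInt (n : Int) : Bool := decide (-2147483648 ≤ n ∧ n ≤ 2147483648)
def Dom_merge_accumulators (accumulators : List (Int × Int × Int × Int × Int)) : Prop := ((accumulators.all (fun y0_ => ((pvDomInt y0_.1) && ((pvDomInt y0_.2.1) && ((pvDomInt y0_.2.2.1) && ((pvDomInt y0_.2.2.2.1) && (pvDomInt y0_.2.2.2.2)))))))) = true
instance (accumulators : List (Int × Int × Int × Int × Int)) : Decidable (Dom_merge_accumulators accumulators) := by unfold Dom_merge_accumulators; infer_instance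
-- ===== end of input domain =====

-- ===== PORT A =====
-- Port of A: a left fold over the rows carrying the five running sums.
def merge_accumulators (accumulators : List (Int × Int × Int × Int × Int)) : Int × Int × Int × Int × Int :=
  accumulators.foldl
    (fun s r => (s.1 + r.1, s.2.1 + r.2.1, s.2.2.1 + r.2.2.1, s.2.2.2.1 + r.2.2.2.1, s.2.2.2.2 + r.2.2.2.2))
    (0, 0, 0, 0, 0)

-- ===== PORT B =====
-- Port of B: transpose into five column lists and sum each column.
def merge_accumulators_alt (accumulators : List (Int × Int × Int × Int × Int)) : Int × Int × Int × Int × Int :=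
  ((accumulators.map (·.1)).sum,
   (accumulators.map (·.2.1)).sum,
   (accumulators.map (·.2.2.1)).sum,
   (accumulators.map (·.2.2.2.1)).sum,
   (accumulators.map (·.2.2.2.2)).sum)

-- ===== PRECONDITION & SPEC =====
def Spec_merge_accumulators (accumulators : List (Int × Int × Int × Int × Int)) (out : Int × Int × Int × Int × Int) : Prop := out = merge_accumulators_alt accumulators
instance (accumulators : List (Int × Int × Int × Int × Int)) (out : Int × Int × Int × Int × Int) : Decidable (Spec_merge_accumulators accumulators out) := by unfold Spec_merge_accumulators; infer_instance

-- ===== CLAIM (what is proved, stated in full; the proofs are below) =====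
def Claim_equal_merge_accumulators : Prop := ∀ (accumulators : List (Int × Int × Int × Int × Int)), Dom_merge_accumulators accumulators → Spec_merge_accumulators accumulators (merge_accumulators accumulators)

-- ===== LEMMAS AND PROOFS =====

lemma fold_eq (accumulators : List (Int × Int × Int × Int × Int))
    (s : Int × Int × Int × Int × Int) :
    accumulators.foldl
      (fun s r => (s.1 + r.1, s.2.1 + r.2.1, s.2.2.1 + r.2.2.1, s.2.2.2.1 + r.2.2.2.1, s.2.2.2.2 + r.2.2.2.2)) s
    = (s.1 + (accumulators.map (·.1)).sum,
       s.2.1 + (accumulators.map (·.2.1)).sum,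
       s.2.2.1 + (accumulators.map (·.2.2.1)).sum,
       s.2.2.2.1 + (accumulators.map (·.2.2.2.1)).sum,
       s.2.2.2.2 + (accumulators.map (·.2.2.2.2)).sum) := by
  induction accumulators generalizing s with
  | nil => simp
  | cons h t ih =>
    simp only [List.foldl_cons, List.map_cons, List.sum_cons, ih]
    obtain ⟨a,b,c,d,e⟩ := s
    simp
    omega

-- ===== VERDICT (by name: the statement is the Claim_ definition above) =====
theorem merge_accumulators_spec : Claim_equal_merge_accumulators := by
  intro accumulators _
  unfold Spec_merge_accumulators merge_accumulators merge_accumulators_alt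
  rw [fold_eq]
  simp
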